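-- pv_equiv track=rewrite | github.com/tahmid-bhuiyan/100-Days-of-Code | BasicProjects/Loops&Lists.py | box_sort
-- ===== SOURCE A (Python) =====
-- def box_sort(names, sizes):
-- #creates a list that will hold all the boxes
-- 	list = [[], [], [], []]
-- #as item is iterated over range of names
-- 	for item in range(len(names)):
-- #sets how large the item is
-- 		fit = sizes[item]
-- #if the item can fit in box, execute and add to list
-- 		if fit <= 2:
-- 			list[0] += [names[item]]
-- 			if item == len(names) - 1:
-- 				return list
-- 			continue
-- #if the item can fit in box, execute and add to list
-- 		elif fit <= 5:
-- 			list[1] += [names[item]]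
-- 			if item == len(names) - 1:
-- 				return list
-- 			continue
-- #if the item can fit in box, execute and add to list
-- 		elif fit <= 25:
-- 			list[2] += [names[item]]
-- 			if item == len(names) - 1:
-- 				return list
-- 			continue
-- #if the item can fit in box, execute and add to list
-- 		elif fit <= 50:
-- 			list[3] += [names[item]]
-- 			if item == len(names) - 1:
-- 				return list
-- 			continue
-- #if the last name is reached, return existing list
-- 		elif item == len(names) - 1:
-- 			return list
-- #if name doesnt fix in any boxes, continue
-- 		elif fit > 50 or fit < 0:
-- 			continue
-- ===== SOURCE B (Python) =====
-- # Staged passes: one independent range-filter comprehension per box instead of a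
-- # single stateful bucketing loop.
-- def box_sort(names, sizes):
--     b0 = [names[i] for i in range(len(names)) if sizes[i] <= 2]
--     b1 = [names[i] for i in range(len(names)) if 2 < sizes[i] <= 5]
--     b2 = [names[i] for i in range(len(names)) if 5 < sizes[i] <= 25]
--     b3 = [names[i] for i in range(len(names)) if 25 < sizes[i] <= 50]
--     return [b0, b1, b2, b3]
-- ===== Notes on version B (the rewrite author's own statement) =====
-- stated objective: simpler
-- what changed: Replaces A's single stateful index loop (four-way if/elif chain with per-iteration early-return bookkeeping mutating shared buckets) by four independent staged filter comprehensions, one per box.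
-- outside the precondition, e.g. on box_sort([], []): A returns None, B returns [[], [], [], []]
import Mathlib
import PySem

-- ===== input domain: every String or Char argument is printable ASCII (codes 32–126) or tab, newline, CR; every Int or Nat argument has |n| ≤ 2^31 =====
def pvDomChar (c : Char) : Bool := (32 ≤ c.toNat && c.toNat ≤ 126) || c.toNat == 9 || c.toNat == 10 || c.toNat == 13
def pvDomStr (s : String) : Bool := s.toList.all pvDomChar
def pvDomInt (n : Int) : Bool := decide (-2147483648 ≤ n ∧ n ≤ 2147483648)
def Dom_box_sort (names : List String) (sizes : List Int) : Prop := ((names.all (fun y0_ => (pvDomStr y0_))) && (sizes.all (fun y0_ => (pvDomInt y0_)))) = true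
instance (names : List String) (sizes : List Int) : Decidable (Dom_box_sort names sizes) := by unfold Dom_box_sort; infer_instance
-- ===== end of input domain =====

-- B replaces A's single stateful index loop with four independent staged filter passes
-- (one range comprehension per box over zip(names, sizes)); same O(n) cost, simpler structure.
-- Outside Pre_ (empty names) Python A returns None, which has no List value; the ports return lists there.

-- ===== PORT A =====
-- the for-loop of A: 'item' is the range index, 'lst' the mutable list of four boxes;
-- returns none where Python A raises IndexError (sizes[item] out of range) or falls off the loop.
def box_sort_loop (names : List String) (sizes : List Int) (item : Nat) (lst : List (List String)) : Option (List (List String)) :=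
  if h : item < names.length then
    match PySem.List.pyGet? sizes (item : Int) with
    | none => none
    | some fit =>
      let nm := names[item]
      if fit ≤ 2 then
        let lst := lst.set 0 (lst.getD 0 [] ++ [nm])
        if item = names.length - 1 then some lst else box_sort_loop names sizes (item+1) lst
      else if fit ≤ 5 then
        let lst := lst.set 1 (lst.getD 1 [] ++ [nm])
        if item = names.length - 1 then some lst else box_sort_loop names sizes (item+1) lst
      else if fit ≤ 25 then
        let lst := lst.set 2 (lst.getD 2 [] ++ [nm])
        if item = names.length - 1 then some lst else box_sort_loop names sizes (item+1) lst
      else if fit ≤ 50 then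
        let lst := lst.set 3 (lst.getD 3 [] ++ [nm])
        if item = names.length - 1 then some lst else box_sort_loop names sizes (item+1) lst
      else if item = names.length - 1 then some lst
      else box_sort_loop names sizes (item+1) lst
  else none
termination_by names.length - item

def box_sort (names : List String) (sizes : List Int) : List (List String) :=
  (box_sort_loop names sizes 0 [[], [], [], []]).getD [[], [], [], []]

-- ===== PORT B =====
-- one comprehension of Source B: [names[i] for i in range(len(names)) if <pred>(sizes[i])];
-- where Python raises IndexError (sizes[i] missing) the filter drops i — Pre_ excludes those inputs.
def compB (names : List String) (sizes : List Int) (pred : Int → Bool) : List String :=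
  ((List.range names.length).filter (fun (i : Nat) =>
      match PySem.List.pyGet? sizes (i : Int) with
      | some s => pred s
      | none => false)).map (fun (i : Nat) => (PySem.List.pyGet? names (i : Int)).getD "")

def box_sort_alt (names : List String) (sizes : List Int) : List (List String) :=
  [ compB names sizes (fun s => decide (s ≤ 2)),
    compB names sizes (fun s => decide (2 < s ∧ s ≤ 5)),
    compB names sizes (fun s => decide (5 < s ∧ s ≤ 25)),
    compB names sizes (fun s => decide (25 < s ∧ s ≤ 50)) ]

-- ===== PRECONDITION & SPEC =====
-- Pre_ excludes names = [] (Python A returns None there, not a list) and sizes shorter than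
-- names (Python A raises IndexError there).
def Pre_box_sort (names : List String) (sizes : List Int) : Prop :=
  names ≠ [] ∧ names.length ≤ sizes.length
instance (names : List String) (sizes : List Int) : Decidable (Pre_box_sort names sizes) := by unfold Pre_box_sort; infer_instance

def pvWitness_box_sort : List String × List Int := (["a"], [1])

def Spec_box_sort (names : List String) (sizes : List Int) (out : List (List String)) : Prop := out = box_sort_alt names sizes
instance (names : List String) (sizes : List Int) (out : List (List String)) : Decidable (Spec_box_sort names sizes out) := by unfold Spec_box_sort; infer_instance

-- ===== CLAIM (what is proved, stated in full; the proofs are below) =====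
def Claim_equal_box_sort : Prop := ∀ (names : List String) (sizes : List Int), Dom_box_sort names sizes → Pre_box_sort names sizes → Spec_box_sort names sizes (box_sort names sizes)

-- ===== LEMMAS AND PROOFS =====

-- proof helper: A's loop body as a fold step over (name, size) pairs
def aStep (lst : List (List String)) (p : String × Int) : List (List String) :=
  if p.2 ≤ 2 then lst.set 0 (lst.getD 0 [] ++ [p.1])
  else if p.2 ≤ 5 then lst.set 1 (lst.getD 1 [] ++ [p.1])
  else if p.2 ≤ 25 then lst.set 2 (lst.getD 2 [] ++ [p.1])
  else if p.2 ≤ 50 then lst.set 3 (lst.getD 3 [] ++ [p.1])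
  else lst

lemma loop_eq (names : List String) (sizes : List Int) (hle : names.length ≤ sizes.length) :
    ∀ (k item : Nat) (lst : List (List String)), names.length - item = k → item < names.length →
      box_sort_loop names sizes item lst =
        some (((names.zip sizes).drop item).foldl aStep lst) := by
  intro k
  induction k with
  | zero => intro item lst hk hi; omega
  | succ k ih =>
    intro item lst hk hi
    have hiz : item < (names.zip sizes).length := by simp [List.length_zip]; omega
    have hdrop : (names.zip sizes).drop item
        = (names[item], sizes[item]) :: (names.zip sizes).drop (item + 1) := by
      rw [List.drop_eq_getElem_cons hiz, List.getElem_zip]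
    have hget : PySem.List.pyGet? sizes (item : Int) = some sizes[item] := by
      rw [PySem.List.pyGet?_natCast]; exact List.getElem?_eq_getElem (by omega)
    rw [box_sort_loop]
    simp only [hi, dif_pos, hget, hdrop, List.foldl_cons, aStep]
    by_cases hlast : item = names.length - 1
    · have hnil : (names.zip sizes).drop (item + 1) = [] := by
        apply List.drop_eq_nil_of_le; simp [List.length_zip]; omega
      simp only [hnil, List.foldl_nil]
      split_ifs <;> first | rfl | omega
    · have hrec : ∀ l, box_sort_loop names sizes (item+1) l
          = some (((names.zip sizes).drop (item+1)).foldl aStep l) :=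
        fun l => ih (item+1) l (by omega) (by omega)
      split_ifs <;> first | omega | rw [hrec]

-- B's range comprehension equals a filter-map over the zipped pairs (when sizes is long enough)
lemma compB_eq : ∀ (names : List String) (sizes : List Int), names.length ≤ sizes.length →
    ∀ (pred : Int → Bool),
      compB names sizes pred = ((names.zip sizes).filter (fun p => pred p.2)).map Prod.fst := by
  intro names
  induction names with
  | nil => intro sizes _ pred; simp [compB]
  | cons a as ih =>
    intro sizes hle pred
    match sizes with
    | [] => simp at hle
    | s :: ss =>
      have hle' : as.length ≤ ss.length := by simpa using hle
      have step : ∀ i : Nat,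
          PySem.List.pyGet? (s :: ss) ((Nat.succ i : Nat) : Int) = PySem.List.pyGet? ss (i : Int) := by
        intro i; rw [PySem.List.pyGet?_natCast, PySem.List.pyGet?_natCast]; simp
      have stepn : ∀ i : Nat,
          PySem.List.pyGet? (a :: as) ((Nat.succ i : Nat) : Int) = PySem.List.pyGet? as (i : Int) := by
        intro i; rw [PySem.List.pyGet?_natCast, PySem.List.pyGet?_natCast]; simp
      have h0 : PySem.List.pyGet? (s :: ss) ((0 : Nat) : Int) = some s := by
        rw [PySem.List.pyGet?_natCast]; rfl
      have h0n : PySem.List.pyGet? (a :: as) ((0 : Nat) : Int) = some a := by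
        rw [PySem.List.pyGet?_natCast]; rfl
      simp only [compB, List.length_cons, List.range_succ_eq_map, List.filter_cons,
        List.filter_map, List.map_map, List.zip_cons_cons]
      simp only [Function.comp_def, step, stepn, h0, h0n, Option.getD_some]
      by_cases hp : pred s
      · simp only [hp, if_true, List.map_cons, Option.getD_some, List.filter_cons]
        rw [← ih ss hle' pred]; simp [compB]
      · simp only [hp, if_false, List.filter_cons, Bool.false_eq_true]
        rw [← ih ss hle' pred]; simp [compB]

-- the fold of A's step equals the four staged zip filters
lemma foldl_aStep (pairs : List (String × Int)) : ∀ (l0 l1 l2 l3 : List String),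
    pairs.foldl aStep [l0, l1, l2, l3] =
      [ l0 ++ (pairs.filter (fun p => decide (p.2 ≤ 2))).map Prod.fst,
        l1 ++ (pairs.filter (fun p => decide (2 < p.2 ∧ p.2 ≤ 5))).map Prod.fst,
        l2 ++ (pairs.filter (fun p => decide (5 < p.2 ∧ p.2 ≤ 25))).map Prod.fst,
        l3 ++ (pairs.filter (fun p => decide (25 < p.2 ∧ p.2 ≤ 50))).map Prod.fst ] := by
  induction pairs with
  | nil => simp
  | cons p ps ih =>
    intro l0 l1 l2 l3
    simp only [List.foldl_cons, List.filter_cons, aStep]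
    by_cases h1 : p.2 ≤ 2
    · simp [h1, ih, List.set, List.getD, List.append_assoc,
        show ¬2 < p.2 by omega, show ¬5 < p.2 by omega, show ¬25 < p.2 by omega]
    · by_cases h2 : p.2 ≤ 5
      · simp [h1, h2, ih, List.set, List.getD, List.append_assoc,
          show 2 < p.2 by omega, show ¬5 < p.2 by omega, show ¬25 < p.2 by omega]
      · by_cases h3 : p.2 ≤ 25
        · simp [h1, h2, h3, ih, List.set, List.getD, List.append_assoc,
            show 5 < p.2 by omega, show ¬25 < p.2 by omega]
        · by_cases h4 : p.2 ≤ 50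
          · simp [h1, h2, h3, h4, ih, List.set, List.getD, List.append_assoc,
              show 25 < p.2 by omega]
          · simp [h1, h2, h3, h4, ih, show ¬p.2 ≤ 5 by omega, show ¬p.2 ≤ 25 by omega,
              show ¬p.2 ≤ 50 by omega]

-- ===== VERDICT (by name: the statement is the Claim_ definition above) =====
theorem box_sort_spec : Claim_equal_box_sort := by
  intro names sizes _ hpre
  obtain ⟨hne, hle⟩ := hpre
  have h0 : 0 < names.length := List.length_pos_iff.mpr hne
  unfold Spec_box_sort box_sort box_sort_alt
  rw [loop_eq names sizes hle (names.length - 0) 0 [[], [], [], []] rfl h0]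
  simp [foldl_aStep, compB_eq names sizes hle]
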